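-- pv_equiv track=rewrite | github.com/goodsky/goodsky-dev-wordgames | scripts/crossword/generate_games.py | build_word_wildcard_variants
-- ===== SOURCE A (Python) =====
-- def build_word_wildcard_variants(word):
--     wildcards = []
--     length = len(word)
--     for mask in range(1 << length):
--         variant = list(word)
--         for i in range(length):
--             if (mask >> i) & 1:
--                 variant[i] = '?'
--         wildcards.append(''.join(variant))
--     return wildcards
-- ===== SOURCE B (Python) =====
-- def build_word_wildcard_variants(word):
--     # Incremental doubling: each character keeps its real value first, then '?'.
--     prefixes = [[]]
--     for c in word:
--         prefixes = [p + [c] for p in prefixes] + [p + ['?'] for p in prefixes]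
--     return [''.join(p) for p in prefixes]
-- ===== Notes on version B (the rewrite author's own statement) =====
-- stated objective: alternative
-- what changed: Replaces the 2^n-mask loop with inner per-index bit tests by an incremental doubling over the word's characters (each step appends the real character to all prefixes, then '?'), eliminating all bit manipulation.
import Mathlib
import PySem

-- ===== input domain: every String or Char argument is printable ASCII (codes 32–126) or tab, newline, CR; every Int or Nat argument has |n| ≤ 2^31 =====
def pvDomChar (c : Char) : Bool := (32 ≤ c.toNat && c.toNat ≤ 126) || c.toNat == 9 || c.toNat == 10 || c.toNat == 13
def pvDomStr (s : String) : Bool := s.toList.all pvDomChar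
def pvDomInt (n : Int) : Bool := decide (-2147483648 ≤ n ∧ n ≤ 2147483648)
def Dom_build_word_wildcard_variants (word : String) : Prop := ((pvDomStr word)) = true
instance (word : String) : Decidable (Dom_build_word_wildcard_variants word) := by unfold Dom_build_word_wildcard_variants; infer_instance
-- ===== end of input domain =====

-- B replaces A's 2^n-mask loop (with per-index bit tests) by an incremental doubling over the
-- word's characters; same cost, no bit manipulation (objective: alternative).

-- ===== PORT A =====
-- Shift amounts (length, i) are nonnegative Ints here, so '.toNat' is exact for Python's '<<'/'>>'.
def build_word_wildcard_variants (word : String) : List String :=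
  let length : Int := PySem.Str.len word
  (PySem.List.pyRange 0 ((1 : Int) <<< length.toNat) 1).foldl (fun wildcards mask =>
    let variant : List Char :=
      (PySem.List.pyRange 0 length 1).foldl (fun variant i =>
        if PySem.Int.band (mask >>> i.toNat) 1 = 1 then PySem.List.pySetD variant i '?'
        else variant) word.toList
    wildcards ++ [String.ofList variant]) []

-- ===== PORT B =====
def build_word_wildcard_variants_alt (word : String) : List String :=
  (word.toList.foldl (fun prefixes c =>
    prefixes.map (fun p => p ++ [c]) ++ prefixes.map (fun p => p ++ ['?'])) [[]]).map String.ofList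

-- ===== PRECONDITION & SPEC =====
def Spec_build_word_wildcard_variants (word : String) (out : List String) : Prop := out = build_word_wildcard_variants_alt word
instance (word : String) (out : List String) : Decidable (Spec_build_word_wildcard_variants word out) := by unfold Spec_build_word_wildcard_variants; infer_instance

-- ===== CLAIM (what is proved, stated in full; the proofs are below) =====
def Claim_equal_build_word_wildcard_variants : Prop := ∀ (word : String), Dom_build_word_wildcard_variants word → Spec_build_word_wildcard_variants word (build_word_wildcard_variants word)

-- ===== LEMMAS AND PROOFS =====

-- A's inner loop, after normalisation to Nat masks/indices.
def pvApplyMask (m : Nat) (l : List Char) : List Char :=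
  (List.range l.length).foldl (fun v i => if m.testBit i then v.set i '?' else v) l

-- B's doubling step.
def pvStep (prefixes : List (List Char)) (c : Char) : List (List Char) :=
  prefixes.map (fun p => p ++ [c]) ++ prefixes.map (fun p => p ++ ['?'])

theorem pvFoldl_app {α β : Type} (xs : List α) (init : List β) (f : α → β) :
    xs.foldl (fun acc x => acc ++ [f x]) init = init ++ xs.map f := by
  induction xs generalizing init with
  | nil => simp
  | cons x xs ih => simp [ih]

theorem pvMaskFold_length (P : Nat → Bool) (ks : List Nat) (v : List Char) :
    (ks.foldl (fun v i => if P i then v.set i '?' else v) v).length = v.length := by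
  induction ks generalizing v with
  | nil => rfl
  | cons k ks ih => simp only [List.foldl_cons]; split <;> simp [ih]

theorem pvMaskFold_append (P : Nat → Bool) (ks : List Nat) (v : List Char) (d : Char)
    (h : ∀ i ∈ ks, i < v.length) :
    ks.foldl (fun v i => if P i then v.set i '?' else v) (v ++ [d])
      = ks.foldl (fun v i => if P i then v.set i '?' else v) v ++ [d] := by
  induction ks generalizing v with
  | nil => rfl
  | cons k ks ih =>
    simp only [List.foldl_cons]
    have hk : k < v.length := h k (List.mem_cons_self ..)
    by_cases hp : P k
    · rw [if_pos hp, if_pos hp, List.set_append, if_pos hk]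
      exact ih (v.set k '?') (fun i hi => by simpa using h i (List.mem_cons_of_mem _ hi))
    · rw [if_neg hp, if_neg hp]
      exact ih v (fun i hi => h i (List.mem_cons_of_mem _ hi))

theorem pvApplyMask_concat (m : Nat) (l : List Char) (c : Char) :
    pvApplyMask m (l ++ [c])
      = if m.testBit l.length then pvApplyMask m l ++ ['?'] else pvApplyMask m l ++ [c] := by
  unfold pvApplyMask
  have hlen : (l ++ [c]).length = l.length + 1 := by simp
  rw [hlen, List.range_succ, List.foldl_append,
    pvMaskFold_append (fun i => m.testBit i) (List.range l.length) l c
      (fun i hi => List.mem_range.mp hi)]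
  simp only [List.foldl_cons, List.foldl_nil]
  by_cases hb : m.testBit l.length
  · rw [if_pos hb, if_pos hb,
      List.set_append_right _ _ (le_of_eq (pvMaskFold_length (fun i => m.testBit i) _ l))]
    rw [pvMaskFold_length (fun i => m.testBit i) _ l]
    simp
  · rw [if_neg hb, if_neg hb]

theorem pvApplyMask_highbit (m : Nat) (l : List Char) :
    pvApplyMask (2 ^ l.length + m) l = pvApplyMask m l := by
  unfold pvApplyMask
  apply PySem.List.foldl_congr_mem
  intro acc i hi
  rw [Nat.testBit_two_pow_add_gt (List.mem_range.mp hi)]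

theorem pvApplyMask_concat_keep (m : Nat) (l : List Char) (c : Char) (hm : m < 2 ^ l.length) :
    pvApplyMask m (l ++ [c]) = pvApplyMask m l ++ [c] := by
  rw [pvApplyMask_concat, if_neg]
  rw [Nat.testBit_lt_two_pow hm]
  exact Bool.false_ne_true

theorem pvApplyMask_concat_wild (m : Nat) (l : List Char) (c : Char) (hm : m < 2 ^ l.length) :
    pvApplyMask (2 ^ l.length + m) (l ++ [c]) = pvApplyMask m l ++ ['?'] := by
  rw [pvApplyMask_concat, if_pos, pvApplyMask_highbit]
  rw [Nat.testBit_two_pow_add_eq, Nat.testBit_lt_two_pow hm]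
  rfl

theorem pvVA_eq_foldl (l : List Char) :
    (List.range (2 ^ l.length)).map (fun m => pvApplyMask m l) = l.foldl pvStep [[]] := by
  induction l using List.reverseRecOn with
  | nil => simp [pvApplyMask]
  | append_singleton l c ih =>
    rw [List.foldl_append]
    simp only [List.foldl_cons, List.foldl_nil, ← ih]
    have hpow : 2 ^ (l ++ [c]).length = 2 ^ l.length + 2 ^ l.length := by
      simp [List.length_append, pow_succ, Nat.mul_two]
    rw [hpow, List.range_add, List.map_append, List.map_map]
    unfold pvStep
    congr 1
    · rw [List.map_map]
      apply List.map_congr_left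
      intro m hm
      exact pvApplyMask_concat_keep m l c (List.mem_range.mp hm)
    · rw [List.map_map]
      apply List.map_congr_left
      intro m hm
      exact pvApplyMask_concat_wild m l c (List.mem_range.mp hm)

theorem pvInner_eq (l : List Char) (mask : Int) (m : Nat) (hm : mask = (m : Int)) :
    (PySem.List.pyRange 0 (l.length : Int) 1).foldl (fun v i =>
        if PySem.Int.band (@HShiftRight.hShiftRight Int Nat Int Int.instHShiftRightNat mask i.toNat) 1 = 1
        then PySem.List.pySetD v i '?'
        else v) l = pvApplyMask m l := by
  subst hm
  rw [PySem.List.pyRange_zero_natCast, List.foldl_map]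
  unfold pvApplyMask
  apply PySem.List.foldl_congr_mem
  intro v i _
  rw [Int.toNat_natCast, ← Int.natCast_shiftRight,
    show (1 : Int) = ((1 : Nat) : Int) from rfl, PySem.Int.band_natCast,
    Nat.and_one_is_mod, Nat.shiftRight_eq_div_pow]
  by_cases hmod : m / 2 ^ i % 2 = 1
  · rw [if_pos (by exact_mod_cast hmod),
      if_pos (by rw [Nat.testBit_eq_decide_div_mod_eq]; simp [hmod]),
      PySem.List.pySetD_natCast]
  · rw [if_neg (fun hc => hmod (by exact_mod_cast hc)),
      if_neg (by rw [Nat.testBit_eq_decide_div_mod_eq]; simp [hmod])]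

theorem pvA_norm (word : String) :
    build_word_wildcard_variants word
      = (List.range (2 ^ word.toList.length)).map (fun m => String.ofList (pvApplyMask m word.toList)) := by
  unfold build_word_wildcard_variants
  have hlen : (PySem.Str.len word) = (word.toList.length : Int) := by
    simp [PySem.Str.len]
  simp only [hlen]
  rw [show ((1 : Int) <<< ((word.toList.length : Int)).toNat) = ((2 ^ word.toList.length : Nat) : Int) by
    rw [Int.toNat_natCast, Int.shiftLeft_eq]; push_cast; ring]
  rw [PySem.List.pyRange_zero_natCast (2 ^ word.toList.length)]
  rw [List.foldl_map, pvFoldl_app _ [] _, List.nil_append]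
  apply List.map_congr_left
  intro m _
  rw [pvInner_eq word.toList ((m : Nat) : Int) m rfl]

-- ===== VERDICT (by name: the statement is the Claim_ definition above) =====
theorem build_word_wildcard_variants_spec : Claim_equal_build_word_wildcard_variants := by
  intro word _
  unfold Spec_build_word_wildcard_variants build_word_wildcard_variants_alt
  rw [pvA_norm,
    show (word.toList.foldl (fun prefixes c =>
        prefixes.map (fun p => p ++ [c]) ++ prefixes.map (fun p => p ++ ['?'])) [[]])
      = word.toList.foldl pvStep [[]] from rfl,
    ← pvVA_eq_foldl, List.map_map]
  rfl
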